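-- pv_equiv track=rewrite | github.com/ManuelGehl/ori_analysis | functions/gc_skew.py | min_max_skew
-- ===== SOURCE A (Python) =====
-- def min_max_skew(skew_array: list) -> list:
--     """
--     Calculate minimum and maximum values of GC skew.
--
--     Parameters:
--     - skew_array (list): List of GC skew scores.
--
--     Returns:
--     - list: Positions where the skew is minimum.
--     - list: Positions where the skew is maximum.
--     """
--     # Check that skew array is not empty or none
--     if skew_array is None or len(skew_array) == 0:
--         raise ValueError("Empty skew_array")
--     # Check for data type
--     if not isinstance(skew_array, list):
--         raise ValueError("Invalid input type. Please provide a valid skew_array.")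
--
--     # Calculate minimum and maximum values of GC skew
--     minimum_skew = min(skew_array)
--     maximum_skew = max(skew_array)
--
--     # Determines all positions where the skew is minimum and maximum
--     minimum_positions = [index for index, skew in enumerate(skew_array) if skew == minimum_skew]
--     maximum_positions = [index for index, skew in enumerate(skew_array) if skew == maximum_skew]
--
--     return minimum_positions, maximum_positions
-- ===== SOURCE B (Python) =====
-- def min_max_skew(skew_array: list) -> list:
--     if skew_array is None or len(skew_array) == 0:
--         raise ValueError("Empty skew_array")
--     if not isinstance(skew_array, list):
--         raise ValueError("Invalid input type. Please provide a valid skew_array.")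
--     current_min = current_max = skew_array[0]
--     min_positions = []
--     max_positions = []
--     for i, skew in enumerate(skew_array):
--         if skew < current_min:
--             current_min = skew
--             min_positions = [i]
--         elif skew == current_min:
--             min_positions.append(i)
--         if skew > current_max:
--             current_max = skew
--             max_positions = [i]
--         elif skew == current_max:
--             max_positions.append(i)
--     return min_positions, max_positions
-- ===== Notes on version B (the rewrite author's own statement) =====
-- stated objective: alternative
-- what changed: Replaces min()+max()+two full enumerate comprehensions (four passes) by one single pass maintaining running min/max and the two position lists.
import Mathlib
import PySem

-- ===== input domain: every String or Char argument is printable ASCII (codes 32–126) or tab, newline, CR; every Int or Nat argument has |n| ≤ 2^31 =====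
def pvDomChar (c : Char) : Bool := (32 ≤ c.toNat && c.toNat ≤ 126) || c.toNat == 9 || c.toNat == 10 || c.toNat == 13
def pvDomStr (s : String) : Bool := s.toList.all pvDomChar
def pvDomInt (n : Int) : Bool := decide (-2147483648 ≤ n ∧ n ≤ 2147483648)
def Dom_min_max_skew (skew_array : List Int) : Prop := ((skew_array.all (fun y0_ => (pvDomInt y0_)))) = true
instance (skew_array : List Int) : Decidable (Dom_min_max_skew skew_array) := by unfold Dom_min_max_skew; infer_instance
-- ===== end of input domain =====

-- B: instead of A's four passes (min, max, two filtering comprehensions), one single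
-- pass maintaining the running min/max and both position lists.

-- ===== PORT A =====
def min_max_skew (skew_array : List Int) : List Int × List Int :=
  if skew_array.length = 0 then ([], [])  -- Python raises ValueError here; excluded by Pre_
  else
    let minimum_skew := (PySem.List.min? skew_array (fun x => x)).getD 0
    let maximum_skew := (PySem.List.max? skew_array (fun x => x)).getD 0
    let minimum_positions := ((PySem.List.enumerate skew_array).filter (fun p => p.2 == minimum_skew)).map (·.1)
    let maximum_positions := ((PySem.List.enumerate skew_array).filter (fun p => p.2 == maximum_skew)).map (·.1)
    (minimum_positions, maximum_positions)

-- ===== PORT B =====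
-- state: (current_min, current_max, min_positions, max_positions)
def mmsStep (st : Int × Int × List Int × List Int) (p : Int × Int) :
    Int × Int × List Int × List Int :=
  let cm := if p.2 < st.1 then (p.2, [p.1])
            else if p.2 == st.1 then (st.1, st.2.2.1 ++ [p.1])
            else (st.1, st.2.2.1)
  let cM := if p.2 > st.2.1 then (p.2, [p.1])
            else if p.2 == st.2.1 then (st.2.1, st.2.2.2 ++ [p.1])
            else (st.2.1, st.2.2.2)
  (cm.1, cM.1, cm.2, cM.2)

def min_max_skew_alt (skew_array : List Int) : List Int × List Int :=
  match skew_array with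
  | [] => ([], [])  -- Python raises ValueError here; excluded by Pre_
  | v0 :: _ =>
    let st := (PySem.List.enumerate skew_array).foldl mmsStep (v0, v0, [], [])
    (st.2.2.1, st.2.2.2)

-- ===== PRECONDITION & SPEC =====
-- A raises ValueError on the empty list; that is the only input excluded.
def Pre_min_max_skew (skew_array : List Int) : Prop := skew_array ≠ []
instance (skew_array : List Int) : Decidable (Pre_min_max_skew skew_array) := by
  unfold Pre_min_max_skew; infer_instance
def pvWitness_min_max_skew : List Int := [1, -2, 0, -2, 3]

def Spec_min_max_skew (skew_array : List Int) (out : List Int × List Int) : Prop :=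
  out = min_max_skew_alt skew_array
instance (skew_array : List Int) (out : List Int × List Int) : Decidable (Spec_min_max_skew skew_array out) := by
  unfold Spec_min_max_skew; infer_instance

-- ===== CLAIM (what is proved, stated in full; the proofs are below) =====
def Claim_equal_min_max_skew : Prop := ∀ (skew_array : List Int), Dom_min_max_skew skew_array → Pre_min_max_skew skew_array → Spec_min_max_skew skew_array (min_max_skew skew_array)

-- ===== LEMMAS AND PROOFS =====

lemma foldl_min2_le (l : List (Int × Int)) (m : Int) :
    l.foldl (fun x q => min x q.2) m ≤ m := by
  induction l generalizing m with
  | nil => simp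
  | cons p t ih => exact le_trans (ih (min m p.2)) (min_le_left _ _)

lemma le_foldl_max2 (l : List (Int × Int)) (m : Int) :
    m ≤ l.foldl (fun x q => max x q.2) m := by
  induction l generalizing m with
  | nil => simp
  | cons p t ih => exact le_trans (le_max_left _ _) (ih (max m p.2))

lemma min_list_case (i v m c : Int) (a F : List Int) (hc : c ≤ min m v) :
    (if c < min m v then [] else if v < m then [i] else if v = m then a ++ [i] else a) ++ F
      = (if c < m then [] else a) ++ (if v = c then i :: F else F) := by
  split_ifs <;> simp_all <;> omega

lemma max_list_case (i v M c : Int) (b F : List Int) (hc : max M v ≤ c) :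
    (if max M v < c then [] else if v > M then [i] else if v = M then b ++ [i] else b) ++ F
      = (if M < c then [] else b) ++ (if v = c then i :: F else F) := by
  split_ifs <;> simp_all <;> omega

-- characterisation of the single-pass fold in terms of folds and filters
set_option maxRecDepth 10000 in
lemma mms_fold (pairs : List (Int × Int)) (m M : Int) (a b : List Int) :
    pairs.foldl mmsStep (m, M, a, b) =
      (pairs.foldl (fun x q => min x q.2) m,
       pairs.foldl (fun x q => max x q.2) M,
       (if pairs.foldl (fun x q => min x q.2) m < m then [] else a)
         ++ (pairs.filter (fun p => p.2 == pairs.foldl (fun x q => min x q.2) m)).map (·.1),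
       (if M < pairs.foldl (fun x q => max x q.2) M then [] else b)
         ++ (pairs.filter (fun p => p.2 == pairs.foldl (fun x q => max x q.2) M)).map (·.1)) := by
  induction pairs generalizing m M a b with
  | nil => simp
  | cons p t ih =>
    obtain ⟨i, v⟩ := p
    have hmin := foldl_min2_le t (min m v)
    have hmax := le_foldl_max2 t (max M v)
    simp only [List.foldl_cons]
    rw [show mmsStep (m, M, a, b) (i, v) =
        (min m v, max M v,
         (if v < m then ([i] : List Int)
          else if v = m then a ++ [i] else a),
         (if v > M then ([i] : List Int)
          else if v = M then b ++ [i] else b)) from ?_]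
    · rw [ih]
      simp only [List.filter_cons, Prod.mk.injEq]
      refine ⟨trivial, trivial, ?_, ?_⟩
      · -- min position list
        simp only [apply_ite (List.map (fun x : Int × Int => x.1)), List.map_cons, beq_iff_eq]
        exact min_list_case i v m _ a _ hmin
      · -- max position list
        simp only [apply_ite (List.map (fun x : Int × Int => x.1)), List.map_cons, beq_iff_eq]
        exact max_list_case i v M _ b _ hmax
    · simp only [mmsStep]
      split_ifs <;> simp_all <;> omega

lemma foldl_min2_enum (l : List Int) (s : Int) (m : Int) :
    (PySem.List.enumerate l s).foldl (fun x q => min x q.2) m = l.foldl min m := by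
  have := List.foldl_map (f := Prod.snd (α := Int) (β := Int)) (g := min) (l := PySem.List.enumerate l s) (init := m)
  rw [← this, PySem.List.map_snd_enumerate]

lemma foldl_max2_enum (l : List Int) (s : Int) (m : Int) :
    (PySem.List.enumerate l s).foldl (fun x q => max x q.2) m = l.foldl max m := by
  have := List.foldl_map (f := Prod.snd (α := Int) (β := Int)) (g := max) (l := PySem.List.enumerate l s) (init := m)
  rw [← this, PySem.List.map_snd_enumerate]

-- ===== VERDICT (by name: the statement is the Claim_ definition above) =====
theorem min_max_skew_spec : Claim_equal_min_max_skew := by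
  intro l _ hpre
  unfold Spec_min_max_skew
  match l with
  | [] => exact absurd rfl hpre
  | v0 :: tl =>
    simp only [min_max_skew, min_max_skew_alt, List.length_cons, Nat.succ_ne_zero, if_false]
    rw [mms_fold]
    have hmin : (PySem.List.enumerate (v0 :: tl) 0).foldl (fun x q => min x q.2) v0
        = tl.foldl min v0 := by
      rw [foldl_min2_enum]; simp [List.foldl_cons]
    have hmax : (PySem.List.enumerate (v0 :: tl) 0).foldl (fun x q => max x q.2) v0
        = tl.foldl max v0 := by
      rw [foldl_max2_enum]; simp [List.foldl_cons]
    have hmin' : (PySem.List.enumerate tl 1).foldl (fun x q => min x q.2) v0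
        = tl.foldl min v0 := foldl_min2_enum tl 1 v0
    have hmax' : (PySem.List.enumerate tl 1).foldl (fun x q => max x q.2) v0
        = tl.foldl max v0 := foldl_max2_enum tl 1 v0
    simp [PySem.List.min?_id_cons, PySem.List.max?_id_cons,
      PySem.List.enumerate_cons, hmin', hmax']
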